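-- pv_equiv track=rewrite | github.com/Mohamedayman-1/Tnfeez_MOFA | test_upload_fbdi/automatic_posting.py | normalize_base
-- ===== SOURCE A (Python) =====
-- def normalize_base(url: str) -> str:
--     """Normalize the base URL by removing service-specific paths"""
--     if not url:
--         return ""
--     url = url.strip().rstrip("/")
--     for tok in [
--         "/fscmRestApi/resources",
--         "/fscmRestApi",
--         "/fscmService",
--         "/webservices",
--         "/soa-infra",
--     ]:
--         i = url.find(tok)
--         if i != -1:
--             url = url[:i]
--     return url
-- ===== SOURCE B (Python) =====
-- _TOKENS = (
--     "/fscmRestApi/resources",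
--     "/fscmRestApi",
--     "/fscmService",
--     "/webservices",
--     "/soa-infra",
-- )
--
-- def normalize_base(url: str) -> str:
--     """Normalize the base URL by removing service-specific paths"""
--     if not url:
--         return ""
--     url = url.strip()
--     while url.endswith("/"):
--         url = url[:-1]
--     for i in range(len(url)):
--         if any(url.startswith(tok, i) for tok in _TOKENS):
--             return url[:i]
--     return url
-- ===== Notes on version B (the rewrite author's own statement) =====
-- stated objective: alternative
-- what changed: A truncates the URL cumulatively inside a per-token loop (each found token cuts the string before the next search); B strips trailing slashes with an explicit while loop and then scans the string left-to-right once, returning the slice at the first position where any of the five tokens starts; equal because A's cumulative cuts always end at the earliest token occurrence.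
import Mathlib
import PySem

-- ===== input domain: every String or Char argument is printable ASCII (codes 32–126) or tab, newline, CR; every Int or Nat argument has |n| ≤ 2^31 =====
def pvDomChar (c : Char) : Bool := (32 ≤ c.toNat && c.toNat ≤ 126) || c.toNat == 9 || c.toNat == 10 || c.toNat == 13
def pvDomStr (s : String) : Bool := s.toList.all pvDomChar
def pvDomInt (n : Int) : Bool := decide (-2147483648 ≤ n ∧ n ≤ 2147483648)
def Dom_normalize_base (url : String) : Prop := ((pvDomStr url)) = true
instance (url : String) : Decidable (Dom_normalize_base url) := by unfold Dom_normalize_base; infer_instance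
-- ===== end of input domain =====

-- B replaces A's cumulative per-token truncation loop by a while-loop slash strip plus a
-- single left-to-right positional scan that returns at the first index where any token
-- starts (objective: alternative algorithm of the same cost).

-- ===== PORT A =====
def normalize_base (url : String) : String :=
  if url = "" then ""
  else
    let u := PySem.Str.strip url
    -- url.rstrip("/") ported by hand (PySem has no rstrip-with-argument); exact: drops all trailing '/'
    let u := String.ofList ((u.toList.reverse.dropWhile (fun c => c == '/')).reverse)
    (["/fscmRestApi/resources", "/fscmRestApi", "/fscmService", "/webservices", "/soa-infra"]).foldl
      (fun u tok =>
        let i := PySem.Str.find u tok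
        if i ≠ -1 then PySem.Str.slice u none (some i) else u) u

-- ===== PORT B =====
-- module constant _TOKENS of Source B
def pvToksB : List String :=
  ["/fscmRestApi/resources", "/fscmRestApi", "/fscmService", "/webservices", "/soa-infra"]

-- Source B's `while url.endswith("/"): url = url[:-1]`, ported by hand as recursion on the
-- char list; exact: endswith("/") is `getLast? = some '/'`, url[:-1] is dropLast
def pvRstripB (u : List Char) : List Char :=
  if _h : u.getLast? = some '/' then pvRstripB u.dropLast else u
termination_by u.length
decreasing_by
  have hne : u ≠ [] := by intro he; rw [he] at _h; simp at _h
  have := List.length_pos_of_ne_nil hne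
  simp only [List.length_dropLast]; omega

def normalize_base_alt (url : String) : String :=
  if url = "" then ""
  else
    let u := PySem.Str.strip url
    let v := String.ofList (pvRstripB u.toList)
    -- `for i in range(len(url)): if any(url.startswith(tok, i) for tok in _TOKENS): return url[:i]`
    -- ported as find? over range (first i whose test succeeds, early return), exact:
    -- startswith(tok, i) with 0 ≤ i ≤ len is isPrefixOf on the drop, url[:i] with i ≥ 0 is take
    match (List.range v.toList.length).find?
        (fun i => pvToksB.any (fun tok => tok.toList.isPrefixOf (v.toList.drop i))) with
    | some i => String.ofList (v.toList.take i)
    | none => v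

-- ===== PRECONDITION & SPEC =====
def Spec_normalize_base (url : String) (out : String) : Prop := out = normalize_base_alt url
instance (url : String) (out : String) : Decidable (Spec_normalize_base url out) := by unfold Spec_normalize_base; infer_instance

-- ===== CLAIM (what is proved, stated in full; the proofs are below) =====
def Claim_equal_normalize_base : Prop := ∀ (url : String), Dom_normalize_base url → Spec_normalize_base url (normalize_base url)

-- ===== LEMMAS AND PROOFS =====

-- A's loop body, at the List Char level
def cutC (u t : List Char) : List Char :=
  let i := PySem.Chars.find u t
  if i ≠ -1 then PySem.Chars.slice u none (some i) else u

-- position of the first occurrence of t in s, s.length if absent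
def posN (s t : List Char) : Nat :=
  if PySem.Chars.find s t = -1 then s.length else (PySem.Chars.find s t).toNat

-- earliest cut position over a token list
def minPos (s : List Char) (toks : List (List Char)) : Nat :=
  (toks.map (posN s)).foldr min s.length

lemma find_neg_iff' (s t : List Char) :
    PySem.Chars.find s t = -1 ↔ ∀ i, ¬ t <+: s.drop i := by
  rw [PySem.Chars.find_eq_neg_one_iff]
  constructor
  · intro h i hp
    exact h (((PySem.Chars.isIn_iff_infix t s).mp
      ((PySem.Chars.exists_prefix_drop_iff_isIn t s).mp ⟨i, hp⟩)))
  · intro h hinf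
    obtain ⟨j, hj⟩ := (PySem.Chars.exists_prefix_drop_iff_isIn t s).mpr
      ((PySem.Chars.isIn_iff_infix t s).mpr hinf)
    exact h j hj

lemma posN_le (s t : List Char) : posN s t ≤ s.length := by
  unfold posN
  split
  · exact le_refl _
  · have := PySem.Chars.find_le_length s t
    omega

lemma minPos_le (s : List Char) (toks : List (List Char)) : minPos s toks ≤ s.length := by
  induction toks with
  | nil => simp [minPos]
  | cons t ts ih =>
    simp only [minPos, List.map_cons, List.foldr_cons] at *
    omega

lemma cutC_eq_take (s t : List Char) : cutC s t = s.take (posN s t) := by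
  unfold cutC posN
  by_cases h : PySem.Chars.find s t = -1
  · simp [h]
  · have h0 : 0 ≤ PySem.Chars.find s t := by
      have := PySem.Chars.neg_one_le_find s t; omega
    simp [h, PySem.Chars.slice_eq_listSlice, PySem.List.slice_to s h0]

lemma occ_char {s t : List Char} {j k : Nat} (h : t <+: s.drop j) (hk : k < t.length) :
    s[j + k]? = t[k]? := by
  obtain ⟨r, hr⟩ := h
  rw [← List.getElem?_drop, ← hr, List.getElem?_append_left hk]

lemma occ_mono_take {s t : List Char} {i p : Nat} (h : t <+: (s.take p).drop i) :
    t <+: s.drop i := by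
  rw [List.drop_take] at h
  exact h.trans (List.take_prefix _ _)

lemma occ_take {s t : List Char} {i p : Nat} (h : t <+: s.drop i) (hb : i + t.length ≤ p) :
    t <+: (s.take p).drop i := by
  rw [List.drop_take, List.prefix_take_iff]
  exact ⟨h, by omega⟩

lemma no_internal {t : List Char} (h : '/' ∉ t.drop 1) {j : Nat}
    (h1 : 0 < j) (_h2 : j < t.length) : t[j]? ≠ some '/' := by
  intro he
  apply h
  have hg : (t.drop 1)[j - 1]? = some '/' := by
    rw [List.getElem?_drop]
    have : 1 + (j - 1) = j := by omega
    rw [this, he]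
  exact List.mem_of_getElem? hg

lemma slash_at_posN {s t : List Char} (h0 : t[0]? = some '/')
    (hlt : posN s t < s.length) : s[posN s t]? = some '/' := by
  unfold posN at *
  by_cases h : PySem.Chars.find s t = -1
  · simp [h] at hlt
  · have hnn : 0 ≤ PySem.Chars.find s t := by
      have := PySem.Chars.neg_one_le_find s t; omega
    obtain ⟨hocc, _⟩ := PySem.Chars.find_spec hnn
    have hl : 0 < t.length := by
      cases t with
      | nil => simp at h0
      | cons a l => simp
    have hc := occ_char hocc hl
    simp only [if_neg h] at *
    simpa [h0] using hc

-- the no-straddle fact for tokens with no internal '/'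
lemma no_straddle {s t' : List Char} {p j : Nat}
    (hp : p ≤ s.length) (hsl : p < s.length → s[p]? = some '/')
    (hint : '/' ∉ t'.drop 1)
    (hj : t' <+: s.drop j) (hjp : j < p) : j + t'.length ≤ p := by
  by_contra hc
  rw [not_le] at hc
  have hjl : j ≤ s.length := by omega
  have hlen : t'.length ≤ s.length - j := by
    have := hj.length_le
    simpa using this
  have hplen : p < s.length := by omega
  have hchar : s[p]? = t'[p - j]? := by
    have := occ_char hj (k := p - j) (by omega)
    rw [← this]
    congr 1
    omega
  have := no_internal hint (j := p - j) (by omega) (by omega)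
  rw [← hchar] at this
  exact this (hsl hplen)

-- per-token lemma: cutting at p does not move the earliest cut below p
lemma pos_take {s : List Char} {p : Nat} (hp : p ≤ s.length)
    (hsl : p < s.length → s[p]? = some '/')
    {t' : List Char} (h0 : t'[0]? = some '/') (hint : '/' ∉ t'.drop 1) :
    min p (posN (s.take p) t') = min p (posN s t') := by
  have ht' : t' ≠ [] := by intro he; rw [he] at h0; simp at h0
  have htl : 0 < t'.length := List.length_pos_of_ne_nil ht'
  by_cases hA : PySem.Chars.find (s.take p) t' = -1
  · have hL : posN (s.take p) t' = min p s.length := by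
      unfold posN; rw [if_pos hA]; exact List.length_take
    rw [hL]
    by_cases hB : PySem.Chars.find s t' = -1
    · have hR : posN s t' = s.length := by unfold posN; rw [if_pos hB]
      rw [hR]; omega
    · have hnn : 0 ≤ PySem.Chars.find s t' := by
        have := PySem.Chars.neg_one_le_find s t'; omega
      obtain ⟨hocc, _⟩ := PySem.Chars.find_spec hnn
      have hR : posN s t' = (PySem.Chars.find s t').toNat := by unfold posN; rw [if_neg hB]
      rw [hR]
      by_cases hjp : (PySem.Chars.find s t').toNat < p
      · exfalso
        have hb := no_straddle hp hsl hint hocc hjp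
        exact ((find_neg_iff' _ _).mp hA) _ (occ_take hocc hb)
      · omega
  · have hnnA : 0 ≤ PySem.Chars.find (s.take p) t' := by
      have := PySem.Chars.neg_one_le_find (s.take p) t'; omega
    obtain ⟨hoccA, hminA⟩ := PySem.Chars.find_spec hnnA
    have hoccS : t' <+: s.drop (PySem.Chars.find (s.take p) t').toNat := occ_mono_take hoccA
    have hfit : (PySem.Chars.find (s.take p) t').toNat + t'.length ≤ p := by
      have h1 : t'.length ≤ ((s.take p).drop (PySem.Chars.find (s.take p) t').toNat).length :=
        hoccA.length_le
      rw [List.length_drop, List.length_take] at h1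
      omega
    have hB : PySem.Chars.find s t' ≠ -1 := fun hB =>
      ((find_neg_iff' _ _).mp hB) _ hoccS
    have hnnB : 0 ≤ PySem.Chars.find s t' := by
      have := PySem.Chars.neg_one_le_find s t'; omega
    obtain ⟨hoccB, hminB⟩ := PySem.Chars.find_spec hnnB
    have hji : (PySem.Chars.find s t').toNat ≤ (PySem.Chars.find (s.take p) t').toNat := by
      by_contra hc
      rw [not_le] at hc
      exact hminB _ hc hoccS
    have hij : (PySem.Chars.find s t').toNat = (PySem.Chars.find (s.take p) t').toNat := by
      by_contra hne
      have hjlt : (PySem.Chars.find s t').toNat < (PySem.Chars.find (s.take p) t').toNat := by omega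
      by_cases hfits : (PySem.Chars.find s t').toNat + t'.length ≤ p
      · exact hminA _ hjlt (occ_take hoccB hfits)
      · have hjp : (PySem.Chars.find s t').toNat < p := by omega
        have := no_straddle hp hsl hint hoccB hjp
        omega
    have hL : posN (s.take p) t' = (PySem.Chars.find (s.take p) t').toNat := by
      unfold posN; rw [if_neg hA]
    have hR : posN s t' = (PySem.Chars.find s t').toNat := by
      unfold posN; rw [if_neg hB]
    rw [hL, hR, hij]

-- A's cumulative loop cuts at the overall earliest position
lemma min_foldr_min {α : Type} {p : Nat} (l : List α) (f g : α → Nat) (b b' : Nat)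
    (hb : min p b = min p b')
    (h : ∀ x ∈ l, min p (f x) = min p (g x)) :
    min p ((l.map f).foldr min b) = min p ((l.map g).foldr min b') := by
  induction l with
  | nil => exact hb
  | cons x l ih =>
    have h1 := h x (by simp)
    have h2 := ih (fun y hy => h y (by simp [hy]))
    simp only [List.map_cons, List.foldr_cons]
    omega

lemma foldl_cut (toks : List (List Char))
    (h0 : ∀ t ∈ toks, t[0]? = some '/')
    (hint : ∀ t ∈ toks.tail, '/' ∉ t.drop 1) :
    ∀ s : List Char, toks.foldl cutC s = s.take (minPos s toks) := by
  induction toks with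
  | nil => intro s; simp [minPos]
  | cons t ts ih =>
    intro s
    have key : ∀ t' ∈ ts, min (posN s t) (posN (s.take (posN s t)) t') = min (posN s t) (posN s t') := by
      intro t' ht'
      exact pos_take (posN_le s t) (fun hlt => slash_at_posN (h0 t (by simp)) hlt)
        (h0 t' (by simp [ht'])) (hint t' ht')
    rw [List.foldl_cons, cutC_eq_take,
      ih (fun t' ht' => h0 t' (by simp [ht'])) (fun t' ht' => hint t' (List.mem_of_mem_tail ht')),
      List.take_take]
    congr 1
    have hdist := min_foldr_min (p := posN s t) ts (posN (s.take (posN s t))) (posN s)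
      ((s.take (posN s t)).length) s.length
      (by rw [List.length_take]; omega) key
    have h1 : minPos s (t :: ts) = min (posN s t) (minPos s ts) := by
      simp [minPos]
    rw [h1]
    unfold minPos at hdist ⊢
    omega

-- A's Str-level loop, moved to the Chars level
lemma strfold (toks : List String) : ∀ v : String,
    (toks.foldl (fun u tok =>
        let i := PySem.Str.find u tok
        if i ≠ -1 then PySem.Str.slice u none (some i) else u) v).toList
      = (toks.map String.toList).foldl cutC v.toList := by
  induction toks with
  | nil => intro v; simp
  | cons t ts ih =>
    intro v
    rw [List.foldl_cons, List.map_cons, List.foldl_cons, ih]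
    congr 1
    show (if PySem.Str.find v t ≠ -1
        then PySem.Str.slice v none (some (PySem.Str.find v t)) else v).toList =
      cutC v.toList t.toList
    unfold cutC
    by_cases hf : PySem.Chars.find v.toList t.toList = -1
    · simp [PySem.Str.find_eq, hf]
    · simp [PySem.Str.find_eq, hf, PySem.Str.toList_slice]

-- B's while-loop slash strip equals A's reverse/dropWhile/reverse
lemma rstripB_eq (u : List Char) :
    pvRstripB u = (u.reverse.dropWhile (fun c => c == '/')).reverse := by
  induction u using List.reverseRecOn with
  | nil => rw [pvRstripB]; simp
  | append_singleton xs x ih =>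
    rw [pvRstripB]
    by_cases hx : x = '/'
    · rw [dif_pos (by simp [hx])]
      simpa [hx] using ih
    · rw [dif_neg (by simp [hx])]
      simp [hx]

-- minPos is a lower bound on each token's position
lemma minPos_le_posN {s : List Char} {tcs : List (List Char)} {t : List Char}
    (ht : t ∈ tcs) : minPos s tcs ≤ posN s t := by
  induction tcs with
  | nil => simp at ht
  | cons a as ih =>
    have h1 : minPos s (a :: as) = min (posN s a) (minPos s as) := by simp [minPos]
    rcases List.mem_cons.mp ht with he | hm
    · rw [h1, he]; omega
    · have := ih hm; rw [h1]; omega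

-- minPos is attained when some token occurs
lemma minPos_mem {s : List Char} {tcs : List (List Char)}
    (h : minPos s tcs < s.length) : ∃ t ∈ tcs, posN s t = minPos s tcs := by
  induction tcs with
  | nil => simp [minPos] at h
  | cons a as ih =>
    have h1 : minPos s (a :: as) = min (posN s a) (minPos s as) := by simp [minPos]
    rw [h1] at h ⊢
    rcases le_or_gt (posN s a) (minPos s as) with hle | hgt
    · exact ⟨a, by simp, by omega⟩
    · obtain ⟨t, ht, he⟩ := ih (by omega)
      exact ⟨t, by simp [ht], by omega⟩

-- no token occurrence strictly before minPos
lemma no_occ_lt {s : List Char} {tcs : List (List Char)} {i : Nat}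
    (hi : i < minPos s tcs) : ∀ t ∈ tcs, ¬ t <+: s.drop i := by
  intro t ht hp
  have hle := minPos_le_posN (s := s) ht
  by_cases hf : PySem.Chars.find s t = -1
  · exact ((find_neg_iff' s t).mp hf) i hp
  · have hnn : 0 ≤ PySem.Chars.find s t := by
      have := PySem.Chars.neg_one_le_find s t; omega
    obtain ⟨_, hmin⟩ := PySem.Chars.find_spec hnn
    have hpos : posN s t = (PySem.Chars.find s t).toNat := by unfold posN; rw [if_neg hf]
    exact hmin i (by omega) hp

-- some token occurs at minPos when minPos < length
lemma occ_at_min {s : List Char} {tcs : List (List Char)}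
    (h : minPos s tcs < s.length) : ∃ t ∈ tcs, t <+: s.drop (minPos s tcs) := by
  obtain ⟨t, ht, he⟩ := minPos_mem h
  have hf : PySem.Chars.find s t ≠ -1 := by
    intro hf; unfold posN at he; rw [if_pos hf] at he; omega
  have hnn : 0 ≤ PySem.Chars.find s t := by
    have := PySem.Chars.neg_one_le_find s t; omega
  obtain ⟨hocc, _⟩ := PySem.Chars.find_spec hnn
  have hpos : posN s t = (PySem.Chars.find s t).toNat := by unfold posN; rw [if_neg hf]
  rw [hpos] at he
  exact ⟨t, ht, he ▸ hocc⟩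

lemma find?_range_none {p : Nat → Bool} {n : Nat} (h : ∀ i < n, ¬ p i = true) :
    (List.range n).find? p = none :=
  List.find?_eq_none.mpr (fun x hx => h x (List.mem_range.mp hx))

lemma find?_range_some {p : Nat → Bool} {n m : Nat} (hm : m < n) (hp : p m = true)
    (h : ∀ j < m, ¬ p j = true) : (List.range n).find? p = some m := by
  have hsplit : n = (m + 1) + (n - (m + 1)) := by omega
  rw [hsplit, List.range_add, List.find?_append]
  have h1 : (List.range (m + 1)).find? p = some m := by
    rw [List.range_succ, List.find?_append, find?_range_none h]
    simp [hp]
  rw [h1]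
  rfl

-- B's positional scan finds exactly the earliest cut position
lemma scan_eq (tcs : List (List Char)) (s : List Char) :
    (match (List.range s.length).find? (fun i => tcs.any (fun t => t.isPrefixOf (s.drop i))) with
      | some i => s.take i
      | none => s) = s.take (minPos s tcs) := by
  have hpred : ∀ i, (tcs.any (fun t => t.isPrefixOf (s.drop i)) = true) ↔
      ∃ t ∈ tcs, t <+: s.drop i := by
    intro i
    simp [List.any_eq_true, List.isPrefixOf_iff_prefix]
  by_cases hc : minPos s tcs = s.length
  · rw [find?_range_none (fun i hi => by
      rw [hpred i]
      push Not
      intro t ht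
      exact no_occ_lt (by omega) t ht)]
    rw [hc, List.take_length]
  · have hlt : minPos s tcs < s.length := by
      have := minPos_le s tcs; omega
    rw [find?_range_some hlt ((hpred _).mpr (occ_at_min hlt))
      (fun j hj => by
        rw [hpred j]
        push Not
        intro t ht
        exact no_occ_lt hj t ht)]

-- ===== VERDICT (by name: the statement is the Claim_ definition above) =====
theorem normalize_base_spec : Claim_equal_normalize_base := by
  unfold Claim_equal_normalize_base
  intro url _
  unfold Spec_normalize_base normalize_base normalize_base_alt
  by_cases h : url = ""
  · simp [h]
  · rw [if_neg h, if_neg h]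
    simp only [rstripB_eq]
    set w : String :=
      String.ofList (((PySem.Str.strip url).toList.reverse.dropWhile (fun c => c == '/')).reverse)
      with hw
    refine String.toList_inj.mp ?_
    rw [strfold]
    rw [show (["/fscmRestApi/resources", "/fscmRestApi", "/fscmService", "/webservices", "/soa-infra"] : List String) = pvToksB from rfl]
    rw [foldl_cut (pvToksB.map String.toList) (by decide) (by decide) w.toList]
    have hany : ∀ i : Nat, (pvToksB.any (fun tok => tok.toList.isPrefixOf (w.toList.drop i)))
        = (pvToksB.map String.toList).any (fun t => t.isPrefixOf (w.toList.drop i)) := by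
      intro i; rw [List.any_map]; rfl
    have hscan := scan_eq (pvToksB.map String.toList) w.toList
    cases hfind : (List.range w.toList.length).find?
        (fun i => pvToksB.any (fun tok => tok.toList.isPrefixOf (w.toList.drop i))) with
    | none =>
      simp only [funext hany] at hfind
      rw [hfind] at hscan
      simpa using hscan.symm
    | some i =>
      simp only [funext hany] at hfind
      rw [hfind] at hscan
      simpa using hscan.symm
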